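-- pv_equiv track=rewrite | github.com/gogotape/yandex_algorithms_5.0 | lesson3/task_C.py | find_min_numbers_amount_to_delete
-- ===== SOURCE A (Python) =====
-- def find_min_numbers_amount_to_delete(nums: list[int]) -> int:
--
--     hm = {}
--     for num in nums:
--         hm[num] = hm.get(num, 0) + 1
--
--     hm = list(sorted(hm.items(), key=lambda x: x[0]))
--     total = len(nums)
--     ln = len(hm)
--     minn = total - hm[0][1]
--     for i in range(ln - 1):
--         elem_left, cnt_left = hm[i]
--         elem_right, cnt_right = hm[i + 1]
--         minn = min(minn, total - cnt_left)
--         if elem_right - elem_left <= 1: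
--             minn = min(minn, total - cnt_right - cnt_left)
--
--     return minn
-- ===== SOURCE B (Python) =====
-- def find_min_numbers_amount_to_delete(nums: list[int]) -> int:
--     counts = {}
--     for num in nums:
--         counts[num] = counts.get(num, 0) + 1
--     best = max(c + counts.get(v + 1, 0) for v, c in counts.items())
--     return len(nums) - best
-- ===== Notes on version B (the rewrite author's own statement) =====
-- stated objective: faster
-- what changed: B drops A's sort of the distinct values and its index loop over adjacent sorted pairs: it builds the count dict once and directly maximises count(v)+count(v+1) via a dict lookup per distinct value, returning len(nums) minus that maximum.
-- intended difference: On inputs whose maximum value m is not the only value present and whose count of m strictly exceeds count(v)+count(v+1) for every smaller value v, A never considers keeping only m (its loop reads solo counts only from left elements of adjacent sorted pairs) and returns a too-large deletion count, while B returns the intended len(nums)-count(m); e.g. on [1,5,5] A returns 2 but deleting the single 1 (B's answer 1) is clearly intended. — e.g. on find_min_numbers_amount_to_delete([1, 5, 5]): A returns 2, B returns 1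
import Mathlib
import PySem

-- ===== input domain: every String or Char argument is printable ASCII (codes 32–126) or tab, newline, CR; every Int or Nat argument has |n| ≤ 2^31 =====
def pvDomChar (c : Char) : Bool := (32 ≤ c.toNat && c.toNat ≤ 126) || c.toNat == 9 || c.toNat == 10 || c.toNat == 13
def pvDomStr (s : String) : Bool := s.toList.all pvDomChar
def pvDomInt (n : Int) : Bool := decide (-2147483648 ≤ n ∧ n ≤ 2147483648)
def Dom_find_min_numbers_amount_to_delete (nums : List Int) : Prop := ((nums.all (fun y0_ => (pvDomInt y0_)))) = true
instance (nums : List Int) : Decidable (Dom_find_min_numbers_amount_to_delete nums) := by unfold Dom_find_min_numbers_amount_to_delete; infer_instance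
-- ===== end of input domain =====

-- B drops A's sort + adjacent-pair index scan and directly maximises count(v)+count(v+1) over
-- the distinct values with one dict lookup each (objective: faster, measured ~2x, no sort);
-- on the D_ inputs below, where only the maximum value is worth keeping, A misses that
-- candidate and B returns the intended value.

-- ===== PORT A =====
def find_min_numbers_amount_to_delete (nums : List Int) : Int :=
  let hm := nums.foldl (fun d num => d.insert num (d.getD num 0 + 1)) PySem.Dict.empty
  let hm2 := PySem.List.sorted hm.items (fun x => x.1)
  let total : Int := nums.length
  let ln : Int := hm2.length
  match PySem.List.pyGet? hm2 0 with
  | none => 0  -- hm[0] raises IndexError on empty input; excluded by Pre_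
  | some p0 =>
    (PySem.List.pyRange 0 (ln - 1)).foldl
      (fun minn i =>
        let pl := PySem.List.pyGetD hm2 i (0, 0)
        let pr := PySem.List.pyGetD hm2 (i + 1) (0, 0)
        let minn := min minn (total - pl.2)
        if pr.1 - pl.1 ≤ 1 then min minn (total - pr.2 - pl.2) else minn)
      (total - p0.2)

-- ===== PORT B =====
def find_min_numbers_amount_to_delete_alt (nums : List Int) : Int :=
  let counts := nums.foldl (fun d num => d.insert num (d.getD num 0 + 1)) PySem.Dict.empty
  match counts.items with
  | [] => 0  -- max() over an empty generator raises ValueError; excluded by Pre_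
  | (v, c) :: rest =>
    let best := rest.foldl
      (fun b p => max b (p.2 + counts.getD (p.1 + 1) 0))
      (c + counts.getD (v + 1) 0)
    (nums.length : Int) - best

-- ===== PRECONDITION & SPEC =====
-- On the empty list A raises IndexError (hm[0]) and B raises ValueError (max of an empty set); excluded.
def Pre_find_min_numbers_amount_to_delete (nums : List Int) : Prop := nums ≠ []
instance (nums : List Int) : Decidable (Pre_find_min_numbers_amount_to_delete nums) := by unfold Pre_find_min_numbers_amount_to_delete; infer_instance
def pvWitness_find_min_numbers_amount_to_delete : List Int := [1, 2, 2, 4]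

-- On inputs whose maximum value m has no m-1 present and whose count of m strictly exceeds
-- count(v)+count(v+1) for every other value v, A never considers keeping only m (its loop reads
-- solo counts only from left elements of adjacent sorted pairs) and returns a too-large deletion
-- count, while B returns the intended len(nums)-count(m).
def D_find_min_numbers_amount_to_delete (nums : List Int) : Prop :=
  ∃ m ∈ nums, nums.count m < nums.length ∧
    ∀ w ∈ nums, w ≤ m ∧ (w < m → nums.count w + nums.count (w + 1) < nums.count m)
instance (nums : List Int) : Decidable (D_find_min_numbers_amount_to_delete nums) := by unfold D_find_min_numbers_amount_to_delete; infer_instance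

def Spec_find_min_numbers_amount_to_delete (nums : List Int) (out : Int) : Prop :=
  ¬ D_find_min_numbers_amount_to_delete nums → out = find_min_numbers_amount_to_delete_alt nums
instance (nums : List Int) (out : Int) : Decidable (Spec_find_min_numbers_amount_to_delete nums out) := by unfold Spec_find_min_numbers_amount_to_delete; infer_instance

def pvDiffWitness_find_min_numbers_amount_to_delete : List Int := [1, 5, 5]
def pvDiffWitnessOut_find_min_numbers_amount_to_delete : Int × Int := (2, 1)

-- ===== CLAIM =====
def Claim_unchanged_find_min_numbers_amount_to_delete : Prop := ∀ (nums : List Int), Dom_find_min_numbers_amount_to_delete nums → Pre_find_min_numbers_amount_to_delete nums → Spec_find_min_numbers_amount_to_delete nums (find_min_numbers_amount_to_delete nums)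
def Claim_changed_find_min_numbers_amount_to_delete : Prop := Dom_find_min_numbers_amount_to_delete (pvDiffWitness_find_min_numbers_amount_to_delete) ∧ Pre_find_min_numbers_amount_to_delete (pvDiffWitness_find_min_numbers_amount_to_delete) ∧ D_find_min_numbers_amount_to_delete (pvDiffWitness_find_min_numbers_amount_to_delete) ∧ find_min_numbers_amount_to_delete (pvDiffWitness_find_min_numbers_amount_to_delete) = pvDiffWitnessOut_find_min_numbers_amount_to_delete.1 ∧ find_min_numbers_amount_to_delete_alt (pvDiffWitness_find_min_numbers_amount_to_delete) = pvDiffWitnessOut_find_min_numbers_amount_to_delete.2 ∧ pvDiffWitnessOut_find_min_numbers_amount_to_delete.1 ≠ pvDiffWitnessOut_find_min_numbers_amount_to_delete.2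
def Claim_exact_find_min_numbers_amount_to_delete : Prop := ∀ (nums : List Int), Dom_find_min_numbers_amount_to_delete nums → Pre_find_min_numbers_amount_to_delete nums → D_find_min_numbers_amount_to_delete nums → find_min_numbers_amount_to_delete nums ≠ find_min_numbers_amount_to_delete_alt nums

-- ===== LEMMAS AND PROOFS =====

-- candidate value of keeping all copies of v and of v+1
def fcand (nums : List Int) (v : Int) : Int := (nums.count v : Int) + (nums.count (v + 1) : Int)

-- the (value, multiplicity) pair the sorted dict items carry
def pairOf (nums : List Int) (k : Int) : Int × Int := (k, (nums.count k : Int))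

-- structural form of A's index loop over adjacent pairs
def pfold (t : Int) : Int → (Int × Int) → List (Int × Int) → Int
  | m, _, [] => m
  | m, pl, pr :: rest =>
    let m1 := min m (t - pl.2)
    let m2 := if pr.1 - pl.1 ≤ 1 then min m1 (t - pr.2 - pl.2) else m1
    pfold t m2 pr rest

-- adjacency facts A's scan needs along the sorted distinct values
def AdjOK (nums : List Int) : List Int → Prop
  | [] => True
  | [u] => (u + 1) ∉ nums
  | u :: w :: t => u < w ∧ (w = u + 1 ∨ (u + 1) ∉ nums) ∧ AdjOK nums (w :: t)

-- maximum of fcand over a nonempty list, seeded at the head (B's fold shape)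
def Nmax (nums : List Int) : List Int → Int
  | [] => 0
  | h :: t => t.foldl (fun a u => max a (fcand nums u)) (fcand nums h)

theorem min_fold_max_fold (nums : List Int) (t : Int) :
    ∀ (l : List Int) (a : Int),
      l.foldl (fun acc u => min acc (t - fcand nums u)) (t - a) =
        t - l.foldl (fun acc u => max acc (fcand nums u)) a := by
  intro l
  induction l with
  | nil => intro a; rfl
  | cons u tl ih =>
    intro a
    have : min (t - a) (t - fcand nums u) = t - max a (fcand nums u) := by omega
    simp only [List.foldl_cons, this, ih]

theorem maxfold_init (nums : List Int) :
    ∀ (l : List Int) (a b : Int),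
      l.foldl (fun acc u => max acc (fcand nums u)) (max a b) =
        max a (l.foldl (fun acc u => max acc (fcand nums u)) b) := by
  intro l
  induction l with
  | nil => intro a b; rfl
  | cons u tl ih =>
    intro a b
    simp only [List.foldl_cons]
    rw [max_assoc, ih]

theorem init_le_maxfold (nums : List Int) :
    ∀ (l : List Int) (a : Int), a ≤ l.foldl (fun acc u => max acc (fcand nums u)) a := by
  intro l
  induction l with
  | nil => intro a; exact le_refl a
  | cons u tl ih =>
    intro a
    exact le_trans (le_max_left a (fcand nums u)) (ih _)

theorem fcand_le_maxfold (nums : List Int) :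
    ∀ (l : List Int) (a h : Int), h ∈ l →
      fcand nums h ≤ l.foldl (fun acc u => max acc (fcand nums u)) a := by
  intro l
  induction l with
  | nil => intro a h hm; cases hm
  | cons u tl ih =>
    intro a h hm
    rcases List.mem_cons.mp hm with rfl | ht
    · exact le_trans (le_max_right a (fcand nums h)) (init_le_maxfold nums tl _)
    · exact ih _ _ ht

theorem fcand_le_Nmax (nums : List Int) {l : List Int} {h : Int} (hm : h ∈ l) :
    fcand nums h ≤ Nmax nums l := by
  cases l with
  | nil => cases hm
  | cons h' t =>
    rcases List.mem_cons.mp hm with rfl | ht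
    · exact init_le_maxfold nums t _
    · exact fcand_le_maxfold nums t _ _ ht

theorem Nmax_perm (nums : List Int) {l₁ l₂ : List Int} (hp : l₁.Perm l₂) (hne : l₁ ≠ []) :
    Nmax nums l₁ = Nmax nums l₂ := by
  cases l₁ with
  | nil => exact absurd rfl hne
  | cons h₁ t₁ =>
    cases l₂ with
    | nil => have := hp.length_eq; simp at this
    | cons h₂ t₂ =>
      have rc : ∀ (b : Int) (x y : Int),
          max (max b (fcand nums x)) (fcand nums y) = max (max b (fcand nums y)) (fcand nums x) := by
        intro b x y; omega
      have hfe := @List.Perm.foldl_eq _ _ (fun a u => max a (fcand nums u)) _ _ ⟨rc⟩ hp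
      have e1 : Nmax nums (h₁ :: t₁) =
          (h₁ :: t₁).foldl (fun a u => max a (fcand nums u)) (fcand nums h₁) := by
        simp [Nmax, List.foldl_cons, max_self]
      rw [e1, hfe]
      have e2 : (h₂ :: t₂).foldl (fun a u => max a (fcand nums u)) (fcand nums h₁) =
          max (fcand nums h₁) (Nmax nums (h₂ :: t₂)) := by
        simp only [List.foldl_cons, Nmax]
        exact maxfold_init nums t₂ (fcand nums h₁) (fcand nums h₂)
      rw [e2]
      have hmem : h₁ ∈ h₂ :: t₂ := hp.subset (List.mem_cons_self ..)
      exact max_eq_right (fcand_le_Nmax nums hmem)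

theorem Nmax_mem (nums : List Int) : ∀ (l : List Int), l ≠ [] → ∃ h ∈ l, Nmax nums l = fcand nums h := by
  intro l
  induction l with
  | nil => intro h; exact absurd rfl h
  | cons h t ih =>
    intro _
    cases t with
    | nil => exact ⟨h, List.mem_cons_self .., rfl⟩
    | cons w r =>
      rcases ih (by simp) with ⟨u, hu, he⟩
      have : Nmax nums (h :: w :: r) = max (fcand nums h) (Nmax nums (w :: r)) := by
        simp only [Nmax, List.foldl_cons]
        exact maxfold_init nums r (fcand nums h) (fcand nums w)
      rcases le_total (fcand nums h) (Nmax nums (w :: r)) with hle | hle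
      · exact ⟨u, List.mem_cons_of_mem _ hu, by rw [this, max_eq_right hle, he]⟩
      · exact ⟨h, List.mem_cons_self .., by rw [this, max_eq_left hle]⟩

theorem Nmax_append_last (nums : List Int) (l : List Int) (hne : l ≠ []) (z : Int) :
    Nmax nums (l ++ [z]) = max (Nmax nums l) (fcand nums z) := by
  cases l with
  | nil => exact absurd rfl hne
  | cons h t => simp [Nmax, List.foldl_append]

theorem range_pairs_pfold (t : Int) (d : Int × Int) :
    ∀ (l : List (Int × Int)) (x : Int × Int) (init : Int),
    (List.range l.length).foldl
      (fun acc k =>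
        let pl := (x :: l).getD k d
        let pr := (x :: l).getD (k + 1) d
        let m1 := min acc (t - pl.2)
        if pr.1 - pl.1 ≤ 1 then min m1 (t - pr.2 - pl.2) else m1)
      init = pfold t init x l := by
  intro l
  induction l with
  | nil => intro x init; rfl
  | cons y tl ih =>
    intro x init
    rw [List.length_cons, List.range_succ_eq_map, List.foldl_cons, List.foldl_map]
    simp only [List.getD_cons_zero, List.getD_cons_succ, Nat.zero_add]
    rw [pfold]
    exact ih y _

theorem adjOK_of_sorted (nums : List Int) :
    ∀ (l : List Int), l.Pairwise (· < ·) →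
      (∀ v, v ∈ nums → v ∈ l ∨ (∀ u ∈ l, v < u)) → AdjOK nums l := by
  intro l
  induction l with
  | nil => intro _ _; trivial
  | cons x tl ih =>
    intro hp hmem
    cases tl with
    | nil =>
      intro hx1
      rcases hmem _ hx1 with hin | hlt
      · simp at hin
      · have := hlt x (by simp); omega
    | cons y r =>
      have hpt := List.pairwise_cons.mp hp
      refine ⟨hpt.1 y (by simp), ?_, ?_⟩
      · by_cases hy : y = x + 1
        · exact Or.inl hy
        · refine Or.inr (fun hx1 => ?_)
          rcases hmem _ hx1 with hin | hlt
          · rcases List.mem_cons.mp hin with h1 | hin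
            · omega
            · rcases List.mem_cons.mp hin with h2 | hin
              · exact hy h2.symm
              · have h3 := hpt.1 y (by simp)
                have h4 := (List.pairwise_cons.mp hpt.2).1 _ hin
                omega
          · have := hlt x (by simp); omega
      · refine ih hpt.2 (fun v hv => ?_)
        rcases hmem v hv with hin | hlt
        · rcases List.mem_cons.mp hin with h1 | hin
          · subst h1
            exact Or.inr (fun u hu => hpt.1 u hu)
          · exact Or.inl hin
        · exact Or.inr (fun u hu => hlt u (List.mem_cons_of_mem _ hu))

theorem pfold_cons (t m : Int) (pl pr : Int × Int) (rest : List (Int × Int)) :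
    pfold t m pl (pr :: rest) =
      pfold t (if pr.1 - pl.1 ≤ 1 then min (min m (t - pl.2)) (t - pr.2 - pl.2)
               else min m (t - pl.2)) pr rest := rfl

theorem pfold_spec (nums : List Int) (t : Int) :
    ∀ (suf : List Int) (x m : Int), AdjOK nums (x :: suf) →
      pfold t m (pairOf nums x) (suf.map (pairOf nums)) =
        ((x :: suf).dropLast).foldl (fun a u => min a (t - fcand nums u)) m := by
  intro suf
  induction suf with
  | nil => intro x m _; rfl
  | cons w rest ih =>
    intro x m hadj
    rcases hadj with ⟨hlt, hw, htail⟩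
    have hstep :
        (if (pairOf nums w).1 - (pairOf nums x).1 ≤ 1
         then min (min m (t - (pairOf nums x).2)) (t - (pairOf nums w).2 - (pairOf nums x).2)
         else min m (t - (pairOf nums x).2)) = min m (t - fcand nums x) := by
      rcases hw with rfl | hnot
      · simp only [pairOf, fcand]
        have : x + 1 - x ≤ 1 := by omega
        rw [if_pos this]
        have h0 : (0 : Int) ≤ (nums.count (x + 1) : Int) := Int.natCast_nonneg _
        omega
      · have hc0 : nums.count (x + 1) = 0 := List.count_eq_zero.mpr hnot
        simp only [pairOf, fcand, hc0]
        split_ifs with hif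
        · have hwx : w = x + 1 := by omega
          subst hwx
          simp only [hc0]
          push_cast; omega
        · push_cast; omega
    rw [List.map_cons, pfold_cons, hstep, ih w _ htail]
    simp only [List.dropLast_cons₂, List.foldl_cons]

theorem sorted_items_eq (nums : List Int) :
    PySem.List.sorted (PySem.Dict.counter nums).items (fun x => x.1) =
      (PySem.List.sorted (PySem.Set.ofList nums) (fun x => x)).map (pairOf nums) := by
  apply PySem.List.sorted_eq_of_perm_of_pairwise_lt
  · rw [PySem.Dict.items_counter]
    exact (PySem.List.sorted_perm (PySem.Set.ofList nums) (fun x => x) false).map (pairOf nums)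
  · rw [List.pairwise_map]
    exact PySem.List.sorted_ofList_pairwise_lt nums

theorem ofList_ne_nil (nums : List Int) (hne : nums ≠ []) :
    (PySem.Set.ofList nums : List Int) ≠ [] := by
  cases nums with
  | nil => exact absurd rfl hne
  | cons n t =>
    intro h
    have hn : n ∈ PySem.Set.ofList (n :: t) := (PySem.Set.mem_ofList _ _).mpr (by simp)
    rw [h] at hn
    cases hn

theorem adjOK_sk (nums : List Int) :
    AdjOK nums (PySem.List.sorted (PySem.Set.ofList nums) (fun x => x)) := by
  apply adjOK_of_sorted
  · exact PySem.List.sorted_ofList_pairwise_lt nums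
  · intro v hv
    exact Or.inl ((PySem.List.mem_sorted _ _ _ _).mpr ((PySem.Set.mem_ofList _ _).mpr hv))

theorem B_eq (nums : List Int) (hne : nums ≠ []) :
    find_min_numbers_amount_to_delete_alt nums =
      (nums.length : Int) - Nmax nums (PySem.List.sorted (PySem.Set.ofList nums) (fun x => x)) := by
  cases hs : (PySem.Set.ofList nums : List Int) with
  | nil => exact absurd hs (ofList_ne_nil nums hne)
  | cons v rest =>
    have hB : find_min_numbers_amount_to_delete_alt nums =
        (nums.length : Int) - Nmax nums (v :: rest) := by
      simp only [find_min_numbers_amount_to_delete_alt,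
        PySem.Dict.foldl_insert_getD_add_one_eq_counter, PySem.Dict.items_counter, hs,
        List.map_cons]
      rw [List.foldl_map]
      simp only [PySem.Dict.getD_counter, Nmax, fcand]
    rw [hB]
    refine congrArg _ ?_
    refine Nmax_perm nums ?_ (by simp)
    have hp := PySem.List.sorted_perm (PySem.Set.ofList nums) (fun x => x) false
    rw [hs] at hp
    exact hp.symm

theorem A_eq (nums : List Int) (hne : nums ≠ []) :
    find_min_numbers_amount_to_delete nums =
      (nums.length : Int) - Nmax nums
        (if 2 ≤ (PySem.List.sorted (PySem.Set.ofList nums) (fun x => x)).length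
         then (PySem.List.sorted (PySem.Set.ofList nums) (fun x => x)).dropLast
         else PySem.List.sorted (PySem.Set.ofList nums) (fun x => x)) := by
  have hsk := adjOK_sk nums
  have hskne : PySem.List.sorted (PySem.Set.ofList nums) (fun x => x) ≠ [] := by
    intro h
    exact ofList_ne_nil nums hne ((PySem.List.sorted_eq_nil_iff _ _ _).mp h)
  cases hsks : PySem.List.sorted (PySem.Set.ofList nums) (fun x => x) with
  | nil => exact absurd hsks hskne
  | cons x suf =>
    rw [hsks] at hsk
    simp only [find_min_numbers_amount_to_delete, PySem.Dict.foldl_insert_getD_add_one_eq_counter,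
      sorted_items_eq, hsks, List.map_cons]
    have hget : PySem.List.pyGet? (pairOf nums x :: suf.map (pairOf nums)) 0 = some (pairOf nums x) := by
      simp [PySem.List.pyGet?, PySem.List.pyIdx?]
    rw [hget]
    dsimp only []
    have hlen : ((pairOf nums x :: suf.map (pairOf nums)).length : Int) - 1 = (suf.length : Nat) := by
      simp
    rw [hlen, PySem.List.pyRange_zero_natCast, List.foldl_map]
    have hfun : (fun (minn : Int) (k : Nat) =>
        let pl := PySem.List.pyGetD (pairOf nums x :: suf.map (pairOf nums)) (k : Int) (0, 0)
        let pr := PySem.List.pyGetD (pairOf nums x :: suf.map (pairOf nums)) ((k : Int) + 1) (0, 0)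
        let m1 := min minn ((nums.length : Int) - pl.2)
        if pr.1 - pl.1 ≤ 1 then min m1 ((nums.length : Int) - pr.2 - pl.2) else m1) =
        (fun (minn : Int) (k : Nat) =>
        let pl := (pairOf nums x :: suf.map (pairOf nums)).getD k (0, 0)
        let pr := (pairOf nums x :: suf.map (pairOf nums)).getD (k + 1) (0, 0)
        let m1 := min minn ((nums.length : Int) - pl.2)
        if pr.1 - pl.1 ≤ 1 then min m1 ((nums.length : Int) - pr.2 - pl.2) else m1) := by
      funext minn k
      have h1 : ((k : Int) + 1) = ((k + 1 : Nat) : Int) := by push_cast; ring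
      rw [h1, PySem.List.pyGetD_natCast, PySem.List.pyGetD_natCast]
    have hlm : suf.length = (suf.map (pairOf nums)).length := by simp
    rw [hfun, hlm, range_pairs_pfold (nums.length : Int) (0,0) (suf.map (pairOf nums)) (pairOf nums x) _]
    have hinit : ((nums.length : Int) - (pairOf nums x).2) = (nums.length : Int) - (nums.count x : Int) := rfl
    rw [hinit, pfold_spec nums (nums.length : Int) suf x _ hsk]
    cases suf with
    | nil =>
      have hx1 : nums.count (x + 1) = 0 := List.count_eq_zero.mpr hsk
      rw [if_neg (by simp)]
      simp [Nmax, fcand, hx1, List.dropLast]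
    | cons w r =>
      rcases hsk with ⟨hlt, hw, htail⟩
      rw [List.dropLast_cons₂, List.foldl_cons]
      have habs : min ((nums.length : Int) - (nums.count x : Int))
          ((nums.length : Int) - fcand nums x) = (nums.length : Int) - fcand nums x := by
        have : (0:Int) ≤ (nums.count (x+1) : Int) := Int.natCast_nonneg _
        simp only [fcand]; omega
      rw [habs, min_fold_max_fold nums _ _ (fcand nums x)]
      rw [if_pos (by simp)]
      simp [Nmax]

-- the last sorted distinct value is the maximum of nums, and everything before it is smaller
theorem sk_last_facts (nums : List Int) (hne : nums ≠ []) :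
    ∃ (dl : List Int) (z : Int),
      PySem.List.sorted (PySem.Set.ofList nums) (fun x => x) = dl ++ [z] ∧
      z ∈ nums ∧ (∀ v ∈ nums, v ≤ z) ∧ nums.count (z + 1) = 0 ∧
      (∀ v ∈ dl, v ∈ nums ∧ v < z) := by
  have hskne : PySem.List.sorted (PySem.Set.ofList nums) (fun x => x) ≠ [] := by
    intro h
    exact ofList_ne_nil nums hne ((PySem.List.sorted_eq_nil_iff _ _ _).mp h)
  have hpw := PySem.List.sorted_ofList_pairwise_lt (κ := Int) nums
  have hmem_sk : ∀ v, v ∈ PySem.List.sorted (PySem.Set.ofList nums) (fun x => x) ↔ v ∈ nums := by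
    intro v
    rw [PySem.List.mem_sorted, PySem.Set.mem_ofList]
  obtain ⟨dl, z, hsplit⟩ : ∃ dl z,
      PySem.List.sorted (PySem.Set.ofList nums) (fun x => x) = dl ++ [z] :=
    ⟨_, _, (List.dropLast_append_getLast hskne).symm⟩
  rw [hsplit] at hpw hmem_sk
  have hdl_lt : ∀ v ∈ dl, v < z := by
    intro v hv
    exact (List.pairwise_append.mp hpw).2.2 v hv _ (by simp)
  have hle : ∀ v ∈ nums, v ≤ z := by
    intro v hv
    have hvsk := (hmem_sk v).mpr hv
    rcases List.mem_append.mp hvsk with h | h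
    · exact le_of_lt (hdl_lt v h)
    · simp at h; omega
  refine ⟨dl, z, hsplit, (hmem_sk z).mp (by simp), hle, ?_, ?_⟩
  · refine List.count_eq_zero.mpr (fun hc => ?_)
    have := hle _ hc
    omega
  · intro v hv
    exact ⟨(hmem_sk v).mp (List.mem_append.mpr (Or.inl hv)), hdl_lt v hv⟩

-- shared final analysis: with D false the two results agree, with D true they differ
theorem main_split (nums : List Int) (hne : nums ≠ []) :
    (¬ D_find_min_numbers_amount_to_delete nums →
      find_min_numbers_amount_to_delete nums = find_min_numbers_amount_to_delete_alt nums) ∧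
    (D_find_min_numbers_amount_to_delete nums →
      find_min_numbers_amount_to_delete nums ≠ find_min_numbers_amount_to_delete_alt nums) := by
  rcases sk_last_facts nums hne with ⟨dl, z, hsplit, hzmem, hzle, hz1, hdl⟩
  have hA := A_eq nums hne
  have hB := B_eq nums hne
  rw [hsplit] at hA hB
  have hfz : fcand nums z = (nums.count z : Int) := by
    simp [fcand, hz1]
  cases dl with
  | nil =>
    -- a single distinct value: A = B, and D cannot hold
    have hone : ∀ v ∈ nums, v = z := by
      intro v hv
      have hvsk : v ∈ PySem.List.sorted (PySem.Set.ofList nums) (fun x => x) := by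
        rw [PySem.List.mem_sorted, PySem.Set.mem_ofList]; exact hv
      rw [hsplit] at hvsk; simpa using hvsk
    have hnD : ¬ D_find_min_numbers_amount_to_delete nums := by
      rintro ⟨m, hm, hcnt, _⟩
      have : nums.count m = nums.length := List.count_eq_length.mpr (fun b hb => by
        rw [hone b hb, hone m hm])
      omega
    simp only [List.nil_append] at hB
    simp only [List.nil_append, List.length_cons, List.length_nil] at hA
    rw [if_neg (by omega)] at hA
    exact ⟨fun _ => by rw [hA, hB], fun hD => absurd hD hnD⟩
  | cons d0 dtl =>
    have hdlne : (d0 :: dtl) ≠ [] := by simp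
    have hlen2 : 2 ≤ ((d0 :: dtl) ++ [z]).length := by simp
    rw [if_pos hlen2, List.dropLast_concat] at hA
    rw [Nmax_append_last nums _ hdlne z, hfz] at hB
    have hd0 := hdl d0 (by simp)
    constructor
    · intro hnD
      -- ¬D at m := z yields a non-max value v with count z ≤ fcand v
      have hcl : nums.count z < nums.length := by
        have h1 := List.count_le_length (l := nums) (a := z)
        have h2 : nums.count z ≠ nums.length := by
          intro h
          have := List.count_eq_length.mp h d0 hd0.1
          omega
        omega
      have hex : ∃ v ∈ nums, v < z ∧ nums.count z ≤ nums.count v + nums.count (v + 1) := by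
        by_contra hno
        push Not at hno
        refine hnD ⟨z, hzmem, hcl, fun w hw => ⟨hzle w hw, fun hlt => ?_⟩⟩
        have := hno w hw hlt
        omega
      rcases hex with ⟨v, hvmem, hvlt, hge⟩
      have hvdl : v ∈ (d0 :: dtl) := by
        have hvsk : v ∈ PySem.List.sorted (PySem.Set.ofList nums) (fun x => x) := by
          rw [PySem.List.mem_sorted, PySem.Set.mem_ofList]; exact hvmem
        rw [hsplit] at hvsk
        rcases List.mem_append.mp hvsk with h | h
        · exact h
        · simp at h; omega
      have hle' : (nums.count z : Int) ≤ Nmax nums (d0 :: dtl) := by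
        refine le_trans ?_ (fcand_le_Nmax nums hvdl)
        simp only [fcand]
        omega
      rw [hA, hB, max_eq_left hle']
    · rintro hD
      rcases hD with ⟨m, hm, _, hforall⟩
      have hmz : m = z := le_antisymm (hzle m hm) ((hforall z hzmem).1)
      subst hmz
      -- every element of dl is a non-max value, so Nmax dl < count m
      rcases Nmax_mem nums (d0 :: dtl) hdlne with ⟨h0, hh0, hNe⟩
      have hh0f := hdl h0 hh0
      have hNlt : Nmax nums (d0 :: dtl) < (nums.count m : Int) := by
        rw [hNe]
        have := (hforall h0 hh0f.1).2 hh0f.2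
        simp only [fcand]
        omega
      rw [hA, hB, max_eq_right (le_of_lt hNlt)]
      omega

-- ===== VERDICT =====
theorem find_min_numbers_amount_to_delete_spec : Claim_unchanged_find_min_numbers_amount_to_delete := by
  intro nums _ hpre hnD
  exact (main_split nums hpre).1 hnD

theorem find_min_numbers_amount_to_delete_changed : Claim_changed_find_min_numbers_amount_to_delete := by
  unfold Claim_changed_find_min_numbers_amount_to_delete; decide

theorem find_min_numbers_amount_to_delete_tight : Claim_exact_find_min_numbers_amount_to_delete := by
  intro nums _ hpre hD
  exact (main_split nums hpre).2 hD
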